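-- pv_equiv track=rewrite | github.com/gabriellaec/desoft-analise-exercicios | backup/user_144/ch68_2020_04_09_21_06_06_569735.py | separa_trios
-- ===== SOURCE A (Python) =====
-- def separa_trios(alunos):
--     trio1 = []
--     for i in range(len(alunos)):
--         if alunos[:3] not in trio1:
--             trio1.append(alunos[:3])
--         elif alunos[3:] not in trio1:
--             if alunos[3:] == []:
--                 break
--             else:
--                 trio1.append(alunos[3:])
--
--
--     return trio1
-- ===== SOURCE B (Python) =====
-- def separa_trios(alunos):
--     if not alunos:
--         return []
--     first = alunos[:3]
--     rest = alunos[3:]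
--     if rest == [] or rest == first:
--         return [first]
--     return [first, rest]
-- ===== Notes on version B (the rewrite author's own statement) =====
-- stated objective: faster
-- what changed: Replaced the per-element loop (which re-computes the slices alunos[:3]/alunos[3:] and scans the accumulator with 'not in' on every iteration) by a direct closed form over the two slices computed once, returning one or two groups depending on whether the tail slice is empty or coincides with the head slice.
import Mathlib
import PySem

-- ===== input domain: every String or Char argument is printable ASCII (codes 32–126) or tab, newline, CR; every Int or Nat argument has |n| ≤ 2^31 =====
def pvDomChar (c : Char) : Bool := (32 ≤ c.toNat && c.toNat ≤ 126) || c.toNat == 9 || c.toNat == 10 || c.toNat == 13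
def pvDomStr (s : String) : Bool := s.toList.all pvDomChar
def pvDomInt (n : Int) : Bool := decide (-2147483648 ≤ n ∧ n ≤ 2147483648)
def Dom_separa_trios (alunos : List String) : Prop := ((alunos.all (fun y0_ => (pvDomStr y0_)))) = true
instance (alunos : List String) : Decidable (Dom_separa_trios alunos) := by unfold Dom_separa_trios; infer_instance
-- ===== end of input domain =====

-- B replaces A's loop (re-slicing and membership-scanning each iteration) by a closed form over the two slices computed once; a timing run measured B faster.

-- ===== PORT A =====
-- one iteration of A's loop body (the loop index i is never used by the body)
def pvStepA (alunos : List String) (s : List (List String) × Bool) : List (List String) × Bool :=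
  if s.2 then s
  else if PySem.List.slice alunos none (some 3) ∉ s.1 then
    (s.1 ++ [PySem.List.slice alunos none (some 3)], s.2)
  else if PySem.List.slice alunos (some 3) none ∉ s.1 then
    if PySem.List.slice alunos (some 3) none = ([] : List String) then (s.1, true)
    else (s.1 ++ [PySem.List.slice alunos (some 3) none], s.2)
  else s

def separa_trios (alunos : List String) : List (List String) :=
  ((PySem.List.pyRange 0 (alunos.length : Int) 1).foldl
    (fun s _ => pvStepA alunos s) (([] : List (List String)), false)).1

-- ===== PORT B =====
def separa_trios_alt (alunos : List String) : List (List String) :=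
  if alunos = [] then []
  else
    let first := PySem.List.slice alunos none (some 3)
    let rest := PySem.List.slice alunos (some 3) none
    if rest = [] ∨ rest = first then [first] else [first, rest]

-- ===== PRECONDITION & SPEC =====
def Spec_separa_trios (alunos : List String) (out : List (List String)) : Prop := out = separa_trios_alt alunos
instance (alunos : List String) (out : List (List String)) : Decidable (Spec_separa_trios alunos out) := by unfold Spec_separa_trios; infer_instance

-- ===== CLAIM (what is proved, stated in full; the proofs are below) =====
def Claim_equal_separa_trios : Prop := ∀ (alunos : List String), Dom_separa_trios alunos → Spec_separa_trios alunos (separa_trios alunos)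

-- ===== LEMMAS AND PROOFS =====
-- folding a fixpoint of the (index-independent) loop body changes nothing
lemma foldl_step_fix (alunos : List String) (s : List (List String) × Bool)
    (h : pvStepA alunos s = s) (l : List Int) :
    l.foldl (fun s _ => pvStepA alunos s) s = s := by
  induction l with
  | nil => rfl
  | cons a t ih => simpa [List.foldl, h] using ih

lemma slices_eq (alunos : List String) :
    PySem.List.slice alunos none (some 3) = alunos.take 3 ∧
    PySem.List.slice alunos (some 3) none = alunos.drop 3 := by
  constructor
  · simpa using PySem.List.slice_to alunos (by norm_num : (0:Int) ≤ 3)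
  · simpa using PySem.List.slice_from alunos (by norm_num : (0:Int) ≤ 3)

theorem separa_trios_eq (alunos : List String) :
    separa_trios alunos = separa_trios_alt alunos := by
  obtain ⟨hf, hr⟩ := slices_eq alunos
  match alunos with
  | [] => rfl
  | a :: rest =>
    have hne : (a :: rest) ≠ [] := by simp
    have hfv : (a :: rest).take 3 = a :: rest.take 2 := rfl
    have hfne : (a :: rest).take 3 ≠ [] := by rw [hfv]; simp
    -- one step from the initial state
    have h1 : pvStepA (a :: rest) ([], false) = ([(a :: rest).take 3], false) := by
      simp [pvStepA, hf]
    have hlen : (0 : Int) < ((a :: rest).length : Int) := by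
      simp
    rw [separa_trios, PySem.List.pyRange_one_cons hlen]
    simp only [List.foldl_cons, h1]
    match rest with
    | [] =>
      -- range had a single element; fold is done
      have h0 : PySem.List.pyRange (0 + 1) (([a] : List String).length : Int) 1 = [] := by
        simp
      rw [h0]
      simp [separa_trios_alt, hf, hr]
    | b :: t =>
      have hlen2 : (0 + 1 : Int) < ((a :: b :: t).length : Int) := by
        have h2 : (a :: b :: t).length = t.length + 2 := rfl
        rw [h2]; push_cast; omega
      rw [PySem.List.pyRange_one_cons hlen2]
      simp only [List.foldl_cons]
      set F := List.take 3 (a :: b :: t) with hF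
      set R := List.drop 3 (a :: b :: t) with hR
      by_cases hrf : R = F
      · -- rest slice already present: state is a fixpoint
        have hfix : pvStepA (a :: b :: t) ([F], false) = ([F], false) := by
          simp [pvStepA, hf, hr, hrf]
        rw [hfix, foldl_step_fix _ _ hfix]
        simp [separa_trios_alt, hf, hr, hrf]
      · by_cases hre : R = []
        · -- break: the flag is set, then nothing changes
          have h2 : pvStepA (a :: b :: t) ([F], false) = ([F], true) := by
            simp [pvStepA, hf, hr, hre, hfne]
          have hfix : pvStepA (a :: b :: t) ([F], true) = ([F], true) := by
            simp [pvStepA]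
          rw [h2, foldl_step_fix _ _ hfix]
          simp [separa_trios_alt, hf, hr, hre]
        · -- both pieces appended; that state is a fixpoint
          have h2 : pvStepA (a :: b :: t) ([F], false) = ([F, R], false) := by
            simp [pvStepA, hf, hr, hre, hrf]
          have hfix : pvStepA (a :: b :: t) ([F, R], false) = ([F, R], false) := by
            simp [pvStepA, hf, hr]
          rw [h2, foldl_step_fix _ _ hfix]
          simp [separa_trios_alt, hf, hr, hre, hrf]

-- ===== VERDICT (by name: the statement is the Claim_ definition above) =====
theorem separa_trios_spec : Claim_equal_separa_trios := by
  intro alunos _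
  unfold Spec_separa_trios
  exact separa_trios_eq alunos
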